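-- pv_equiv track=rewrite | github.com/HaifaAlsaif/2025-GP1-G5 | app.py | _compute_turns_count
-- ===== SOURCE A (Python) =====
-- def _compute_turns_count(messages, conversation_type):
--     if conversation_type == "human-ai":
--         return sum(1 for m in messages if m.get("sender_type") not in ("llm", "ai", "assistant", "model"))
--     seq = [m.get("side") for m in messages if m.get("side")]
--     runs = []
--     for s in seq:
--         if not runs or s != runs[-1]:
--             runs.append(s)
--     return len(runs) // 2
-- ===== SOURCE B (Python) =====
-- def _compute_turns_count(messages, conversation_type):
--     if conversation_type == "human-ai":
--         return len(messages) - sum(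
--             1 for m in messages
--             if m.get("sender_type") in ("llm", "ai", "assistant", "model"))
--     seq = [m.get("side") for m in messages if m.get("side")]
--     dup = sum(1 for a, b in zip(seq, seq[1:]) if a == b)
--     return (len(seq) - dup) // 2
-- ===== Notes on version B (the rewrite author's own statement) =====
-- stated objective: alternative
-- what changed: Instead of collapsing the side sequence into a deduplicated runs list and halving its length, B counts adjacent equal pairs via zip(seq, seq[1:]) and computes runs arithmetically as len(seq) - duplicates; the human-ai branch counts the excluded senders and subtracts from len(messages) instead of counting the kept ones.
import Mathlib
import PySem

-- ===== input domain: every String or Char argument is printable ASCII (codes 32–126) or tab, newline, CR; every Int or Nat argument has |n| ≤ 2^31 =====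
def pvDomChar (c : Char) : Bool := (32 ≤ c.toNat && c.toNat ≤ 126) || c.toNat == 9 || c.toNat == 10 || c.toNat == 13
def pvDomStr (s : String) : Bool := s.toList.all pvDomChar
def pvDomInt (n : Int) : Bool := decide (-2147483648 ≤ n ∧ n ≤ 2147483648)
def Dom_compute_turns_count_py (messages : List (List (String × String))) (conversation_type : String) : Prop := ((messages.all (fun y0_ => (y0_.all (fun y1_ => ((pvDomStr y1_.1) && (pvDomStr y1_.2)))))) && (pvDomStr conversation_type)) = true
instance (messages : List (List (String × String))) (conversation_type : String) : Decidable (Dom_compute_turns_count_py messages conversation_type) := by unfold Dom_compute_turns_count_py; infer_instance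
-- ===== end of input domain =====

-- B computes the run count arithmetically (len(seq) minus adjacent equal pairs from zip(seq, seq[1:]))
-- instead of materializing a deduplicated runs list; the human-ai branch counts excluded senders and
-- subtracts from len(messages) instead of counting the kept ones. Objective: alternative decomposition.


-- ===== PORT A =====
-- m.get(k) on the dict (association list, first match)
def pvGetKey (m : List (String × String)) (k : String) : Option String :=
  (PySem.Dict.mk m).get? k

-- m.get("sender_type") not in ("llm", "ai", "assistant", "model")  (None is not in the tuple)
def pvNotLLM (m : List (String × String)) : Bool :=
  !((pvGetKey m "sender_type" == some "llm") || (pvGetKey m "sender_type" == some "ai") ||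
    (pvGetKey m "sender_type" == some "assistant") || (pvGetKey m "sender_type" == some "model"))

-- truthy m.get("side"): some s with s ≠ "" (None and "" are falsy)
def pvSide (m : List (String × String)) : Option String :=
  match pvGetKey m "side" with
  | none => none
  | some s => if s = "" then none else some s

-- the 'for s in seq' loop of A, appending to runs
def pvRunsLoop (runs : List String) (seq : List String) : List String :=
  match seq with
  | [] => runs
  | s :: rest =>
      if runs = [] ∨ some s ≠ runs.getLast? then pvRunsLoop (runs ++ [s]) rest
      else pvRunsLoop runs rest

def compute_turns_count_py (messages : List (List (String × String))) (conversation_type : String) : Int :=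
  if conversation_type = "human-ai" then
    messages.foldl (fun acc m => if pvNotLLM m then acc + 1 else acc) (0 : Int)
  else
    let seq : List String := messages.filterMap pvSide
    let runs : List String := pvRunsLoop [] seq
    PySem.Int.floordiv (runs.length : Int) 2

-- ===== PORT B =====
-- m.get("sender_type") in ("llm", "ai", "assistant", "model")
def pvIsLLM (m : List (String × String)) : Bool :=
  (pvGetKey m "sender_type" == some "llm") || (pvGetKey m "sender_type" == some "ai") ||
  (pvGetKey m "sender_type" == some "assistant") || (pvGetKey m "sender_type" == some "model")

def compute_turns_count_py_alt (messages : List (List (String × String))) (conversation_type : String) : Int :=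
  if conversation_type = "human-ai" then
    (messages.length : Int) -
      messages.foldl (fun acc m => if pvIsLLM m then acc + 1 else acc) (0 : Int)
  else
    let seq : List String := messages.filterMap pvSide
    let dup : Int := (seq.zip (seq.drop 1)).foldl
      (fun acc p => if p.1 = p.2 then acc + 1 else acc) (0 : Int)
    PySem.Int.floordiv ((seq.length : Int) - dup) 2

-- ===== PRECONDITION & SPEC =====
def Spec_compute_turns_count_py (messages : List (List (String × String))) (conversation_type : String) (out : Int) : Prop := out = compute_turns_count_py_alt messages conversation_type
instance (messages : List (List (String × String))) (conversation_type : String) (out : Int) : Decidable (Spec_compute_turns_count_py messages conversation_type out) := by unfold Spec_compute_turns_count_py; infer_instance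

-- ===== CLAIM (what is proved, stated in full; the proofs are below) =====
def Claim_equal_compute_turns_count_py : Prop := ∀ (messages : List (List (String × String))) (conversation_type : String), Dom_compute_turns_count_py messages conversation_type → Spec_compute_turns_count_py messages conversation_type (compute_turns_count_py messages conversation_type)

-- ===== LEMMAS AND PROOFS =====

-- number of elements of seq equal to their predecessor (prev = element before the first)
def pvEqCount : Option String → List String → Int
  | _, [] => 0
  | prev, s :: rest => (if some s = prev then 1 else 0) + pvEqCount (some s) rest

-- counting fold = length of filter (used for both branches' counting folds)
theorem pv_count_eq_filter (p : List (String × String) → Bool)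
    (messages : List (List (String × String))) (c : Int) :
    messages.foldl (fun acc m => if p m then acc + 1 else acc) c
      = c + ((messages.filter p).length : Int) := by
  induction messages generalizing c with
  | nil => simp
  | cons m rest ih =>
      simp only [List.foldl_cons, List.filter_cons]
      by_cases h : p m
      · simp [h, ih (c + 1)]; ring
      · simp [h, ih c]

-- human-ai branch: kept + excluded = total
theorem pv_filter_split (messages : List (List (String × String))) :
    (messages.filter pvNotLLM).length + (messages.filter pvIsLLM).length
      = messages.length := by
  induction messages with
  | nil => simp
  | cons m rest ih =>
      simp only [List.filter_cons]
      have h : pvNotLLM m = !pvIsLLM m := by simp [pvNotLLM, pvIsLLM]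
      by_cases hm : pvIsLLM m <;> simp [hm, h] <;> omega

-- B's zip fold = pvEqCount over the sequence
theorem pv_zip_eqCount (s : String) (rest : List String) (c : Int) :
    ((s :: rest).zip rest).foldl (fun acc p => if p.1 = p.2 then acc + 1 else acc) c
      = c + pvEqCount (some s) rest := by
  induction rest generalizing s c with
  | nil => simp [pvEqCount]
  | cons t rs ih =>
      simp only [List.zip_cons_cons, List.foldl_cons, pvEqCount]
      by_cases h : s = t
      · simp [h, ih t (c + 1)]; ring
      · have h' : ¬ (some t = some s) := by simpa [eq_comm] using h
        simp [h, h', ih t c]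

-- main invariant: A's runs-list length = prefix length + seq length − adjacent-equal count
theorem pv_runs_length (seq : List String) (runs : List String) :
    ((pvRunsLoop runs seq).length : Int)
      = (runs.length : Int) + (seq.length : Int) - pvEqCount runs.getLast? seq := by
  induction seq generalizing runs with
  | nil => simp [pvRunsLoop, pvEqCount]
  | cons s rest ih =>
      simp only [pvRunsLoop, pvEqCount]
      by_cases hcond : some s ≠ runs.getLast?
      · have hA : (runs = [] ∨ some s ≠ runs.getLast?) := Or.inr hcond
        have hlast : (runs ++ [s]).getLast? = some s := by simp
        rw [if_pos hA, ih (runs ++ [s]), hlast]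
        have hind : (if some s = runs.getLast? then (1 : Int) else 0) = 0 := by
          simp [hcond]
        rw [hind]
        simp only [List.length_append, List.length_cons, List.length_nil]
        push_cast; ring
      · push_neg at hcond
        have hne : runs ≠ [] := by
          intro h; subst h; simp at hcond
        have hA : ¬ (runs = [] ∨ some s ≠ runs.getLast?) := by
          simp [hne, hcond]
        rw [if_neg hA, ih runs]
        have hlast2 : runs.getLast? = some s := hcond.symm
        rw [hlast2]
        simp only [List.length_cons, if_pos rfl]
        push_cast; ring

-- ===== VERDICT (by name: the statement is the Claim_ definition above) =====
theorem compute_turns_count_py_spec : Claim_equal_compute_turns_count_py := by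
  intro messages conversation_type _
  unfold Spec_compute_turns_count_py compute_turns_count_py compute_turns_count_py_alt
  by_cases hct : conversation_type = "human-ai"
  · simp only [hct, if_pos rfl, ite_true]
    rw [pv_count_eq_filter pvNotLLM messages 0, pv_count_eq_filter pvIsLLM messages 0]
    have := pv_filter_split messages
    omega
  · simp only [if_neg hct]
    set seq := messages.filterMap pvSide with hseq
    have hruns := pv_runs_length seq []
    have h0 : (([] : List String).getLast? = (none : Option String)) := rfl
    rw [h0] at hruns
    have hzip : ((seq.zip (seq.drop 1)).foldl
        (fun acc p => if p.1 = p.2 then acc + 1 else acc) (0 : Int))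
          = pvEqCount none seq := by
      cases seq with
      | nil => simp [pvEqCount]
      | cons s rest =>
          simp only [List.drop_one, List.tail_cons]
          rw [pv_zip_eqCount s rest 0]
          simp [pvEqCount]
    simp only [hzip, hruns]
    norm_num
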